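-- pv_equiv track=rewrite | github.com/jdonszelmann/research-project | python/benchmarks/map2.py | __num_3neighbors
-- ===== SOURCE A (Python) =====
-- from typing import List, Tuple
--
-- def __num_3neighbors(grid: List[List[int]]) -> int:
--     height = len(grid)
--     width = len(grid[0])
--     res = 0
--     for y in range(height):
--         for x in range(width):
--             count = 0
--             for ndx, ndy in [(0, -1), (0, 1), (-1, 0), (1, 0)]:
--                 neighbor_x = x + ndx
--                 neighbor_y = y + ndy
--                 if 0 <= neighbor_x < width and 0 <= neighbor_y < height and grid[neighbor_y][neighbor_x] == 0:
--                     count += 1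
--             if count == 3:
--                 res += 1
--     return res
-- ===== SOURCE B (Python) =====
-- from typing import List, Tuple
--
-- def __num_3neighbors(grid: List[List[int]]) -> int:
--     height = len(grid)
--     width = len(grid[0])
--     zeros = [[1 if v == 0 else 0 for v in row[:width]] for row in grid]
--     above = [[0] * width] + zeros[:-1]
--     below = zeros[1:] + [[0] * width]
--     res = 0
--     for z, up, down in zip(zeros, above, below):
--         left = [0] + z[:-1]
--         right = z[1:] + [0]
--         nb = [l + r + u + d for l, r, u, d in zip(left, right, up, down)]
--         res += nb.count(3)
--     return res
-- ===== Notes on version B (the rewrite author's own statement) =====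
-- stated objective: faster
-- what changed: B replaces A's per-cell gather over the four neighbours (a triple nested loop with bounds tests per neighbour) by row-level vector shifts: it builds 0/1 zero-indicator rows once, adds the left/right-shifted row and the rows above/below elementwise, and counts the entries equal to 3.
import Mathlib
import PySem

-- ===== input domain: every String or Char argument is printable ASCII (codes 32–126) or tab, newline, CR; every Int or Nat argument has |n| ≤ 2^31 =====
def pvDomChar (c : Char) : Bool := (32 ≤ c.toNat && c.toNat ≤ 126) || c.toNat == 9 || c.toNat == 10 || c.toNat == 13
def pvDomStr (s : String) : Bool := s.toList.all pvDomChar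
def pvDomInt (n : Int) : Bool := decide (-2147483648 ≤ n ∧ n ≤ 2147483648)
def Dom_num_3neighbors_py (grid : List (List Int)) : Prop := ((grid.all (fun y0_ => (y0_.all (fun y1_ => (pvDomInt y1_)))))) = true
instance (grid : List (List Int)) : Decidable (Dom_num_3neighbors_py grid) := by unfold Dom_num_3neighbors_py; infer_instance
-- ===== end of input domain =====

-- B replaces the per-cell gather over the four neighbours by row-level vector shifts:
-- it builds 0/1 zero-indicator rows and sums the left/right/up/down shifted rows, then
-- counts the entries equal to 3 (objective: constant-factor speedup, measured).

-- ===== PORT A =====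
def num_3neighbors_py (grid : List (List Int)) : Int :=
  let height : Int := (grid.length : Int)
  -- width = len(grid[0]); grid[0] raises IndexError on an empty grid (excluded by Pre_)
  let width : Int := ((PySem.List.pyGetD grid 0 []).length : Int)
  (PySem.List.pyRange 0 height 1).foldl (fun res y =>
    (PySem.List.pyRange 0 width 1).foldl (fun res x =>
      let count : Int :=
        ([((0:Int),(-1:Int)), (0,1), (-1,0), (1,0)]).foldl (fun count nd =>
          let neighbor_x := x + nd.1
          let neighbor_y := y + nd.2
          if 0 ≤ neighbor_x ∧ neighbor_x < width ∧ 0 ≤ neighbor_y ∧ neighbor_y < height ∧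
              PySem.List.pyGetD (PySem.List.pyGetD grid neighbor_y []) neighbor_x 0 = 0
          then count + 1 else count) 0
      if count = 3 then res + 1 else res) res) 0

-- ===== PORT B =====
def num_3neighbors_py_alt (grid : List (List Int)) : Int :=
  let width : Nat := (PySem.List.pyGetD grid 0 []).length
  -- row[:width] is (row.take width) by PySem.List.slice_to_natCast
  let zeros : List (List Int) :=
    grid.map (fun row => (row.take width).map (fun v => if v = 0 then (1:Int) else 0))
  -- zeros[:-1] / zeros[1:] are dropLast / drop 1 (PySem.List.slice_to_neg_one, slice_from_one)
  let above := List.replicate width (0:Int) :: zeros.dropLast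
  let below := zeros.drop 1 ++ [List.replicate width (0:Int)]
  (zeros.zip (above.zip below)).foldl (fun res zud =>
    let z := zud.1
    let left := (0:Int) :: z.dropLast
    let right := z.drop 1 ++ [(0:Int)]
    let nb := ((left.zip right).zip (zud.2.1.zip zud.2.2)).map
      (fun p => p.1.1 + p.1.2 + p.2.1 + p.2.2)
    res + (PySem.List.count nb 3 : Int)) 0

-- ===== PRECONDITION & SPEC =====
-- Pre_ excludes exactly the inputs on which A raises IndexError: the empty grid
-- (grid[0]) and ragged grids with a row shorter than the first row (neighbour reads).
def Pre_num_3neighbors_py (grid : List (List Int)) : Prop :=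
  grid ≠ [] ∧ ∀ row ∈ grid, (grid.getD 0 []).length ≤ row.length
instance (grid : List (List Int)) : Decidable (Pre_num_3neighbors_py grid) := by
  unfold Pre_num_3neighbors_py; infer_instance

def pvWitness_num_3neighbors_py : List (List Int) := [[0, 0, 5], [0, 1, 0]]

def Spec_num_3neighbors_py (grid : List (List Int)) (out : Int) : Prop := out = num_3neighbors_py_alt grid
instance (grid : List (List Int)) (out : Int) : Decidable (Spec_num_3neighbors_py grid out) := by unfold Spec_num_3neighbors_py; infer_instance

-- ===== CLAIM (what is proved, stated in full; the proofs are below) =====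
def Claim_equal_num_3neighbors_py : Prop := ∀ (grid : List (List Int)), Dom_num_3neighbors_py grid → Pre_num_3neighbors_py grid → Spec_num_3neighbors_py grid (num_3neighbors_py grid)

-- ===== LEMMAS AND PROOFS =====

-- zero-indicator of cell (y,x), read with defaults (used only in bounds)
def pvZ (grid : List (List Int)) (y x : Nat) : Int :=
  if (grid.getD y []).getD x 0 = 0 then 1 else 0

-- number of in-bounds zero neighbours of cell (y,x), in A's direction order
def pvNb (grid : List (List Int)) (h w y x : Nat) : Int :=
  (if 1 ≤ y then pvZ grid (y-1) x else 0) +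
  (if y+1 < h then pvZ grid (y+1) x else 0) +
  (if 1 ≤ x then pvZ grid y (x-1) else 0) +
  (if x+1 < w then pvZ grid y (x+1) else 0)

def pvTotal (grid : List (List Int)) (h w : Nat) : Int :=
  ((List.range h).map (fun y =>
    ((List.range w).map (fun x => if pvNb grid h w y x = 3 then (1:Int) else 0)).sum)).sum

theorem pv_ite_step (P : Prop) [Decidable P] (r : Int) :
    (if P then r + 1 else r) = r + (if P then 1 else 0) := by split_ifs <;> ring

theorem pv_up (grid : List (List Int)) (h w y x : Nat) (hy : y < h) (hx : x < w) :
    (if 0 ≤ (x:Int) + 0 ∧ (x:Int) + 0 < (w:Int) ∧ 0 ≤ (y:Int) + (-1) ∧ (y:Int) + (-1) < (h:Int) ∧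
        PySem.List.pyGetD (PySem.List.pyGetD grid ((y:Int) + (-1)) []) ((x:Int) + 0) 0 = 0
      then (1:Int) else 0)
    = (if 1 ≤ y then pvZ grid (y-1) x else 0) := by
  by_cases h1 : 1 ≤ y
  · have e : (y:Int) + (-1) = ((y-1 : Nat) : Int) := by omega
    have ex : (x:Int) + 0 = ((x : Nat) : Int) := by omega
    rw [e, ex, PySem.List.pyGetD_natCast, PySem.List.pyGetD_natCast, if_pos h1]
    unfold pvZ
    refine if_congr ?_ rfl rfl
    constructor
    · rintro ⟨_, _, _, _, hc⟩; exact hc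
    · intro hc; exact ⟨by omega, by omega, by omega, by omega, hc⟩
  · have e : ¬ (0 ≤ (y:Int) + (-1)) := by omega
    rw [if_neg h1, if_neg (by tauto)]

theorem pv_down (grid : List (List Int)) (h w y x : Nat) (hy : y < h) (hx : x < w) :
    (if 0 ≤ (x:Int) + 0 ∧ (x:Int) + 0 < (w:Int) ∧ 0 ≤ (y:Int) + 1 ∧ (y:Int) + 1 < (h:Int) ∧
        PySem.List.pyGetD (PySem.List.pyGetD grid ((y:Int) + 1) []) ((x:Int) + 0) 0 = 0
      then (1:Int) else 0)
    = (if y + 1 < h then pvZ grid (y+1) x else 0) := by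
  by_cases h1 : y + 1 < h
  · have e : (y:Int) + 1 = ((y+1 : Nat) : Int) := by omega
    have ex : (x:Int) + 0 = ((x : Nat) : Int) := by omega
    rw [e, ex, PySem.List.pyGetD_natCast, PySem.List.pyGetD_natCast, if_pos h1]
    unfold pvZ
    refine if_congr ?_ rfl rfl
    constructor
    · rintro ⟨_, _, _, _, hc⟩; exact hc
    · intro hc; exact ⟨by omega, by omega, by omega, by omega, hc⟩
  · have e : ¬ ((y:Int) + 1 < (h:Int)) := by omega
    rw [if_neg h1, if_neg (by tauto)]

theorem pv_left (grid : List (List Int)) (h w y x : Nat) (hy : y < h) (hx : x < w) :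
    (if 0 ≤ (x:Int) + (-1) ∧ (x:Int) + (-1) < (w:Int) ∧ 0 ≤ (y:Int) + 0 ∧ (y:Int) + 0 < (h:Int) ∧
        PySem.List.pyGetD (PySem.List.pyGetD grid ((y:Int) + 0) []) ((x:Int) + (-1)) 0 = 0
      then (1:Int) else 0)
    = (if 1 ≤ x then pvZ grid y (x-1) else 0) := by
  by_cases h1 : 1 ≤ x
  · have e : (x:Int) + (-1) = ((x-1 : Nat) : Int) := by omega
    have ey : (y:Int) + 0 = ((y : Nat) : Int) := by omega
    rw [e, ey, PySem.List.pyGetD_natCast, PySem.List.pyGetD_natCast, if_pos h1]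
    unfold pvZ
    refine if_congr ?_ rfl rfl
    constructor
    · rintro ⟨_, _, _, _, hc⟩; exact hc
    · intro hc; exact ⟨by omega, by omega, by omega, by omega, hc⟩
  · have e : ¬ (0 ≤ (x:Int) + (-1)) := by omega
    rw [if_neg h1, if_neg (by tauto)]

theorem pv_right (grid : List (List Int)) (h w y x : Nat) (hy : y < h) (hx : x < w) :
    (if 0 ≤ (x:Int) + 1 ∧ (x:Int) + 1 < (w:Int) ∧ 0 ≤ (y:Int) + 0 ∧ (y:Int) + 0 < (h:Int) ∧
        PySem.List.pyGetD (PySem.List.pyGetD grid ((y:Int) + 0) []) ((x:Int) + 1) 0 = 0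
      then (1:Int) else 0)
    = (if x + 1 < w then pvZ grid y (x+1) else 0) := by
  by_cases h1 : x + 1 < w
  · have e : (x:Int) + 1 = ((x+1 : Nat) : Int) := by omega
    have ey : (y:Int) + 0 = ((y : Nat) : Int) := by omega
    rw [e, ey, PySem.List.pyGetD_natCast, PySem.List.pyGetD_natCast, if_pos h1]
    unfold pvZ
    refine if_congr ?_ rfl rfl
    constructor
    · rintro ⟨_, _, _, _, hc⟩; exact hc
    · intro hc; exact ⟨by omega, by omega, by omega, by omega, hc⟩
  · have e : ¬ ((x:Int) + 1 < (w:Int)) := by omega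
    rw [if_neg h1, if_neg (by tauto)]

theorem A_eq (grid : List (List Int)) :
    num_3neighbors_py grid =
      pvTotal grid grid.length (grid.getD 0 []).length := by
  unfold num_3neighbors_py pvTotal
  simp only [PySem.List.pyGetD_zero, PySem.List.pyRange_zero_natCast, List.foldl_map]
  simp only [List.foldl_cons, List.foldl_nil]
  simp only [pv_ite_step, zero_add]
  simp only [PySem.List.foldl_add, zero_add]
  refine congrArg List.sum (List.map_congr_left ?_)
  intro y hy; rw [List.mem_range] at hy
  refine congrArg List.sum (List.map_congr_left ?_)
  intro x hx; rw [List.mem_range] at hx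
  rw [pv_up grid _ _ y x hy hx, pv_down grid _ _ y x hy hx,
      pv_left grid _ _ y x hy hx, pv_right grid _ _ y x hy hx]
  rfl

theorem pv_shiftl {α : Type} (w : Nat) (hw : 1 ≤ w) (f : Nat → α) (pad : α) :
    pad :: ((List.range w).map f).dropLast
      = (List.range w).map (fun x => if 1 ≤ x then f (x-1) else pad) := by
  refine List.ext_getElem (by simp; omega) ?_
  intro i h1 h2
  rcases i with _ | k
  · simp
  · have hk : k + 1 < w := by simpa using h2
    simp only [List.getElem_cons_succ, List.getElem_dropLast, List.getElem_map,
      List.getElem_range]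
    simp

theorem pv_shiftr {α : Type} (w : Nat) (hw : 1 ≤ w) (f : Nat → α) (pad : α) :
    ((List.range w).map f).drop 1 ++ [pad]
      = (List.range w).map (fun x => if x + 1 < w then f (x+1) else pad) := by
  refine List.ext_getElem (by simp; omega) ?_
  intro i h1 h2
  have hi : i < w := by simpa using h2
  by_cases hc : i + 1 < w
  · rw [List.getElem_append_left (by simp; omega)]
    simp only [List.getElem_drop, List.getElem_map, List.getElem_range]
    simp [Nat.add_comm, hc]
  · have : i = w - 1 := by omega
    rw [List.getElem_append_right (by simp; omega)]
    simp [hc]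

theorem pv_zrow (grid : List (List Int)) (hrows : ∀ row ∈ grid, (grid.getD 0 []).length ≤ row.length) :
    grid.map (fun row => (row.take (grid.getD 0 []).length).map
        (fun v => if v = 0 then (1:Int) else 0))
      = (List.range grid.length).map (fun y =>
          (List.range (grid.getD 0 []).length).map (fun x => pvZ grid y x)) := by
  refine List.ext_getElem (by simp) ?_
  intro y h1 h2
  have hy : y < grid.length := by simpa using h1
  have hlen : (grid.getD 0 []).length ≤ grid[y].length := hrows _ (List.getElem_mem hy)
  simp only [List.getElem_map, List.getElem_range]
  refine List.ext_getElem (by simp only [List.length_map, List.length_take, List.length_range]; omega) ?_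
  intro x hx1 hx2
  have hx : x < (grid.getD 0 []).length := by simpa using hx2
  have e1 : grid.getD y [] = grid[y] := List.getD_eq_getElem _ _ hy
  have e2 : grid[y].getD x 0 = grid[y][x]'(by omega) := List.getD_eq_getElem _ _ (by omega)
  simp only [List.getElem_map, List.getElem_take, List.getElem_range, pvZ, e1, e2]

theorem B_eq (grid : List (List Int)) (hpre : Pre_num_3neighbors_py grid) :
    num_3neighbors_py_alt grid =
      pvTotal grid grid.length (grid.getD 0 []).length := by
  obtain ⟨hne, hrows⟩ := hpre
  have hh : 1 ≤ grid.length := List.length_pos_of_ne_nil hne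
  unfold num_3neighbors_py_alt pvTotal
  simp only [PySem.List.pyGetD_zero]
  rw [pv_zrow grid hrows]
  rw [PySem.List.foldl_add, zero_add]
  rw [pv_shiftl grid.length hh
        (fun y => (List.range (grid.getD 0 []).length).map (fun x => pvZ grid y x))
        (List.replicate (grid.getD 0 []).length 0),
      pv_shiftr grid.length hh
        (fun y => (List.range (grid.getD 0 []).length).map (fun x => pvZ grid y x))
        (List.replicate (grid.getD 0 []).length 0)]
  rw [List.zip_map', List.zip_map', List.map_map]
  refine congrArg List.sum (List.map_congr_left ?_)
  intro y hy; rw [List.mem_range] at hy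
  simp only [Function.comp]
  have hu : (if 1 ≤ y then (List.range (grid.getD 0 []).length).map (fun x => pvZ grid (y-1) x)
        else List.replicate (grid.getD 0 []).length (0:Int))
      = (List.range (grid.getD 0 []).length).map
          (fun x => if 1 ≤ y then pvZ grid (y-1) x else 0) := by
    split_ifs with hc
    · simp
    · simp [List.map_const']
  have hd : (if y + 1 < grid.length then
          (List.range (grid.getD 0 []).length).map (fun x => pvZ grid (y+1) x)
        else List.replicate (grid.getD 0 []).length (0:Int))
      = (List.range (grid.getD 0 []).length).map
          (fun x => if y + 1 < grid.length then pvZ grid (y+1) x else 0) := by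
    split_ifs with hc
    · simp
    · simp [List.map_const']
  rw [hu, hd]
  by_cases hw1 : 1 ≤ (grid.getD 0 []).length
  · rw [pv_shiftl (grid.getD 0 []).length hw1 (fun x => pvZ grid y x) 0,
        pv_shiftr (grid.getD 0 []).length hw1 (fun x => pvZ grid y x) 0]
    rw [List.zip_map', List.zip_map', List.zip_map', List.map_map]
    have hs := PySem.List.sum_map_ite_one_zero
      (fun x => pvNb grid grid.length (grid.getD 0 []).length y x == 3)
      (List.range (grid.getD 0 []).length)
    simp only [beq_iff_eq] at hs
    rw [hs]
    simp only [PySem.List.count, List.count_eq_countP, List.countP_map]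
    norm_cast
    refine List.countP_congr ?_
    intro x hx
    simp only [Function.comp]
    have he : (if 1 ≤ x then pvZ grid y (x-1) else 0)
        + (if x + 1 < (grid.getD 0 []).length then pvZ grid y (x+1) else 0)
        + (if 1 ≤ y then pvZ grid (y-1) x else 0)
        + (if y + 1 < grid.length then pvZ grid (y+1) x else 0)
        = pvNb grid grid.length (grid.getD 0 []).length y x := by
      unfold pvNb; ring
    rw [← he]
  · have hw0 : (grid.getD 0 []).length = 0 := by omega
    simp only [hw0]
    simp

-- ===== VERDICT (by name: the statement is the Claim_ definition above) =====
theorem num_3neighbors_py_spec : Claim_equal_num_3neighbors_py := by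
  intro grid _ hpre
  unfold Spec_num_3neighbors_py
  rw [A_eq grid, B_eq grid hpre]
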